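-- pv_equiv track=rewrite | github.com/esphome-libs/micro-flac | examples/test_lpc_asm/generate_test_vectors.py | select_vectors
-- ===== SOURCE A (Python) =====
-- from collections import defaultdict
--
-- def select_vectors(vectors, max_per_group):
--     """Select a diverse subset of vectors covering all orders and both paths."""
--     groups = defaultdict(list)
--     for i, v in enumerate(vectors):
--         if v["order"] == 0:
--             continue  # Order 0 is identity (no LPC), assembly doesn't handle it
--         key = (v["is_64bit"], v["order"])
--         groups[key].append(i)
--
--     selected_indices = []
--     for key in sorted(groups.keys()):
--         indices = groups[key]
--         selected_indices.extend(indices[:max_per_group])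
--
--     return [vectors[i] for i in sorted(set(selected_indices))]
-- ===== SOURCE B (Python) =====
-- def select_vectors(vectors, max_per_group):
--     """Select a diverse subset of vectors covering all orders and both paths."""
--     counts = {}
--     result = []
--     for v in vectors:
--         order = v["order"]
--         if order == 0:
--             continue  # Order 0 is identity (no LPC), assembly doesn't handle it
--         key = (v["is_64bit"], order)
--         taken = counts.get(key, 0)
--         if taken < max_per_group:
--             result.append(v)
--             counts[key] = taken + 1
--     return result
-- ===== Notes on version B (the rewrite author's own statement) =====
-- stated objective: faster
-- what changed: Replaces the group-by-index/sort-keys/slice/sort-set pipeline with a single streaming pass that keeps a per-key taken counter and appends a vector the moment its group is not yet full, so no index lists, key sort or final sort are built.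
import Mathlib
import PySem

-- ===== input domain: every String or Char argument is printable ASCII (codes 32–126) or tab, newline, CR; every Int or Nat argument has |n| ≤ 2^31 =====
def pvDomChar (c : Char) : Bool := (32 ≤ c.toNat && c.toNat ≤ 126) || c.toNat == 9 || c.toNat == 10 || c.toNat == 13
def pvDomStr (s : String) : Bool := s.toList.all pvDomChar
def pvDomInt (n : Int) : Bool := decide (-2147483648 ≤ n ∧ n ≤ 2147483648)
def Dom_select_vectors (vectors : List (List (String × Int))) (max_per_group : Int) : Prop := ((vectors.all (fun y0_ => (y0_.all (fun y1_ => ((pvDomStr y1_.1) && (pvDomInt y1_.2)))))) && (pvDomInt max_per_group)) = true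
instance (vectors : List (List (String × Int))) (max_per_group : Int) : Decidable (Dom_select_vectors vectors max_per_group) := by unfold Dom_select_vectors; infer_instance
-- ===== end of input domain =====

-- B replaces A's group-by-index / sort-keys / slice / sort-set pipeline by one streaming pass
-- with a per-key counter (no index lists, no sorting); equivalence of the RETURN values is proved below.

-- d[k] for a Python dict given as an association list (first match); both Pythons index their dicts this way.
def dget (v : List (String × Int)) (k : String) : Int := (PySem.Dict.mk v).getD k 0

-- v["order"] and the group key (v["is_64bit"], v["order"]), as both Pythons compute them
def ordOf (v : List (String × Int)) : Int := dget v "order"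
def keyOf (v : List (String × Int)) : Int × Int := (dget v "is_64bit", dget v "order")

-- ===== PORT A =====
def astep (g : PySem.Dict (Int × Int) (List Int)) (iv : Int × List (String × Int)) :
    PySem.Dict (Int × Int) (List Int) :=
  if ordOf iv.2 = 0 then g
  else g.modify (keyOf iv.2) [] (fun l => l ++ [iv.1])

def select_vectors (vectors : List (List (String × Int))) (max_per_group : Int) :
    List (List (String × Int)) :=
  let groups : PySem.Dict (Int × Int) (List Int) :=
    (PySem.List.enumerate vectors 0).foldl astep PySem.Dict.empty
  let selected_indices : List Int :=
    (PySem.List.sorted2 groups.keys (fun k => k.1) (fun k => k.2)).foldl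
      (fun acc key => acc ++ PySem.List.slice (groups.getD key []) none (some max_per_group)) []
  (PySem.List.sorted (PySem.Set.ofList selected_indices) (fun i => i) false).map
    (fun i => PySem.List.pyGetD vectors i [])

-- ===== PORT B =====
def bstep (max_per_group : Int)
    (st : PySem.Dict (Int × Int) Int × List (List (String × Int)))
    (v : List (String × Int)) :
    PySem.Dict (Int × Int) Int × List (List (String × Int)) :=
  if ordOf v = 0 then st
  else
    let key := keyOf v
    let taken := st.1.getD key 0
    if taken < max_per_group then (st.1.insert key (taken + 1), st.2 ++ [v]) else st

def select_vectors_alt (vectors : List (List (String × Int))) (max_per_group : Int) :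
    List (List (String × Int)) :=
  (vectors.foldl (bstep max_per_group) (PySem.Dict.empty, [])).2

-- ===== PRECONDITION & SPEC =====
-- Pre_ excludes (a) dicts on which A's v["order"] / v["is_64bit"] raises KeyError, and
-- (b) negative max_per_group, which is outside the natural domain of a count (there A's
-- slice indices[:m] keeps all but the last |m| of each group — an accident of Python slicing).
def Pre_select_vectors (vectors : List (List (String × Int))) (max_per_group : Int) : Prop :=
  0 ≤ max_per_group ∧
  ∀ v ∈ vectors, ("order" ∈ v.map Prod.fst ∧
    ((PySem.Dict.mk v).getD "order" 0 ≠ 0 → "is_64bit" ∈ v.map Prod.fst))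
instance (vectors : List (List (String × Int))) (max_per_group : Int) :
    Decidable (Pre_select_vectors vectors max_per_group) := by
  unfold Pre_select_vectors; infer_instance

def pvWitness_select_vectors : (List (List (String × Int))) × Int :=
  ([[("order", 1), ("is_64bit", 0)], [("order", 0)]], 1)

def Spec_select_vectors (vectors : List (List (String × Int))) (max_per_group : Int) (out : List (List (String × Int))) : Prop := out = select_vectors_alt vectors max_per_group
instance (vectors : List (List (String × Int))) (max_per_group : Int) (out : List (List (String × Int))) : Decidable (Spec_select_vectors vectors max_per_group out) := by unfold Spec_select_vectors; infer_instance

-- ===== CLAIM (what is proved, stated in full; the proofs are below) =====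
def Claim_equal_select_vectors : Prop := ∀ (vectors : List (List (String × Int))) (max_per_group : Int), Dom_select_vectors vectors max_per_group → Pre_select_vectors vectors max_per_group → Spec_select_vectors vectors max_per_group (select_vectors vectors max_per_group)

-- ===== LEMMAS AND PROOFS =====

-- "v is eligible (order ≠ 0) and belongs to group k"
def pkey (k : Int × Int) (v : List (String × Int)) : Bool :=
  decide (ordOf v ≠ 0) && decide (keyOf v = k)

-- number of eligible vectors of group k in a prefix
def eCnt (pre : List (List (String × Int))) (k : Int × Int) : Nat := pre.countP (pkey k)

-- "position j of vs is selected, given an already-processed prefix pre"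
def condT (m : Int) (pre vs : List (List (String × Int))) (j : Nat) : Bool :=
  decide (ordOf (vs.getD j []) ≠ 0) &&
  decide (((eCnt (pre ++ vs.take j) (keyOf (vs.getD j []))) : Int) < m)

-- the common reference value: the selected vectors, in original order
def pickTail (m : Int) (pre vs : List (List (String × Int))) : List (List (String × Int)) :=
  ((List.range vs.length).filter (condT m pre vs)).map (fun j => vs.getD j [])

lemma pkey_false_of_ne (k : Int × Int) (v : List (String × Int)) (hk : ¬ k = keyOf v) :
    pkey k v = false := by
  unfold pkey
  rw [decide_eq_false (show ¬ keyOf v = k from fun hkk => hk hkk.symm)]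
  simp

lemma eCnt_append_singleton (pre : List (List (String × Int))) (v : List (String × Int))
    (k : Int × Int) :
    eCnt (pre ++ [v]) k = eCnt pre k + (if pkey k v then 1 else 0) := by
  simp [eCnt, List.countP_append, List.countP_cons]

lemma pickTail_cons (m : Int) (pre : List (List (String × Int))) (v : List (String × Int))
    (rest : List (List (String × Int))) :
    pickTail m pre (v :: rest) =
      (if (ordOf v ≠ 0 ∧ ((eCnt pre (keyOf v)) : Int) < m) then [v] else []) ++
        pickTail m (pre ++ [v]) rest := by
  unfold pickTail
  rw [List.length_cons, List.range_succ_eq_map, List.filter_cons]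
  have hshift : List.filter (condT m pre (v :: rest)) (List.map Nat.succ (List.range rest.length))
      = List.map Nat.succ (List.filter (condT m (pre ++ [v]) rest) (List.range rest.length)) := by
    rw [List.filter_map]
    congr 1
    apply List.filter_congr
    intro j _
    simp [condT, Function.comp, List.take_succ_cons, List.append_assoc]
  rw [hshift]
  by_cases h : (ordOf v ≠ 0 ∧ ((eCnt pre (keyOf v)) : Int) < m)
  · rw [if_pos (show condT m pre (v :: rest) 0 = true by
        simp only [condT, List.getD_cons_zero, List.take_zero, List.append_nil,
          Bool.and_eq_true, decide_eq_true_eq, ne_eq]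
        exact ⟨h.1, h.2⟩), if_pos h]
    simp [List.map_map, Function.comp]
  · rw [if_neg (show ¬ condT m pre (v :: rest) 0 = true by
        simp only [condT, List.getD_cons_zero, List.take_zero, List.append_nil,
          Bool.and_eq_true, decide_eq_true_eq, ne_eq]
        exact h), if_neg h]
    simp [List.map_map, Function.comp]

lemma bfold (m : Int) :
    ∀ (vs pre : List (List (String × Int))) (d : PySem.Dict (Int × Int) Int)
      (acc : List (List (String × Int))),
      (∀ k, d.getD k 0 = min m (eCnt pre k : Int)) →
      (vs.foldl (bstep m) (d, acc)).2 = acc ++ pickTail m pre vs := by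
  intro vs
  induction vs with
  | nil => intro pre d acc _; simp [pickTail]
  | cons v rest ih =>
    intro pre d acc hinv
    rw [List.foldl_cons, pickTail_cons]
    by_cases h0 : ordOf v = 0
    · have hstep : bstep m (d, acc) v = (d, acc) := by simp [bstep, h0]
      rw [hstep, ih (pre ++ [v]) d acc ?_]
      · simp [h0]
      · intro k
        rw [hinv k, eCnt_append_singleton]
        simp [pkey, h0]
    · have hkv : pkey (keyOf v) v = true := by simp [pkey, h0]
      by_cases hlt : d.getD (keyOf v) 0 < m
      · have he : ((eCnt pre (keyOf v)) : Int) < m := by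
          by_contra hge
          rw [not_lt] at hge
          rw [hinv, min_eq_left hge] at hlt
          exact lt_irrefl _ hlt
        have hstep : bstep m (d, acc) v
            = (d.insert (keyOf v) (d.getD (keyOf v) 0 + 1), acc ++ [v]) := by
          simp [bstep, h0, hlt]
        rw [hstep, ih (pre ++ [v]) _ (acc ++ [v]) ?_]
        · simp [h0, he]
        · intro k
          rw [PySem.Dict.getD_insert, eCnt_append_singleton]
          by_cases hk : k = keyOf v
          · rw [if_pos hk, hinv, hk, if_pos hkv, min_eq_right (le_of_lt he)]
            have h1 : ((eCnt pre (keyOf v) : Int) + 1) ≤ m := by omega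
            push_cast
            rw [min_eq_right h1]
          · rw [if_neg hk, hinv, pkey_false_of_ne k v hk]
            simp
      · have he : m ≤ ((eCnt pre (keyOf v)) : Int) := by
          by_contra hge
          rw [not_le] at hge
          rw [hinv, min_eq_right (le_of_lt hge)] at hlt
          exact hlt hge
        have hstep : bstep m (d, acc) v = (d, acc) := by
          simp [bstep, h0, hlt]
        rw [hstep, ih (pre ++ [v]) d acc ?_]
        · have hne : ¬ ((eCnt pre (keyOf v)) : Int) < m := by omega
          simp [hne]
        · intro k
          rw [hinv, eCnt_append_singleton]
          by_cases hk : k = keyOf v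
          · rw [hk, if_pos hkv, min_eq_left he, min_eq_left (by push_cast; omega)]
          · rw [pkey_false_of_ne k v hk]
            simp

-- ===== A-side lemmas =====

def Gl (vs : List (List (String × Int))) (k : Int × Int) : List Int :=
  ((PySem.List.enumerate vs 0).filter (fun iv => pkey k iv.2)).map (·.1)

lemma afold_getD : ∀ (l : List (Int × List (String × Int)))
    (d : PySem.Dict (Int × Int) (List Int)) (k : Int × Int),
    (l.foldl astep d).getD k [] = d.getD k [] ++ (l.filter (fun iv => pkey k iv.2)).map (·.1) := by
  intro l
  induction l with
  | nil => intro d k; simp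
  | cons iv rest ih =>
    intro d k
    rw [List.foldl_cons, List.filter_cons]
    by_cases h0 : ordOf iv.2 = 0
    · rw [show astep d iv = d by simp [astep, h0], ih]
      simp [pkey, h0]
    · rw [show astep d iv = d.modify (keyOf iv.2) [] (fun l => l ++ [iv.1]) by
        simp [astep, h0], ih, PySem.Dict.getD_modify]
      by_cases hk : k = keyOf iv.2
      · have hp : pkey (keyOf iv.2) iv.2 = true := by simp [pkey, h0]
        rw [if_pos hk, hk]
        simp [hp, List.append_assoc]
      · rw [if_neg hk, pkey_false_of_ne k iv.2 hk]
        simp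

lemma afold_keys : ∀ (l : List (Int × List (String × Int)))
    (d : PySem.Dict (Int × Int) (List Int)) (k : Int × Int),
    (k ∈ (l.foldl astep d).keys ↔ k ∈ d.keys ∨ ∃ iv ∈ l, pkey k iv.2 = true) := by
  intro l
  induction l with
  | nil => intro d k; simp
  | cons iv rest ih =>
    intro d k
    rw [List.foldl_cons]
    by_cases h0 : ordOf iv.2 = 0
    · rw [show astep d iv = d by simp [astep, h0], ih]
      have hp : pkey k iv.2 = false := by simp [pkey, h0]
      simp [hp]
    · rw [show astep d iv = d.modify (keyOf iv.2) [] (fun l => l ++ [iv.1]) by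
        simp [astep, h0], ih, PySem.Dict.keys_modify]
      simp only [PySem.Dict.mem_keys_insert, List.mem_cons]
      have hp : pkey k iv.2 = true ↔ k = keyOf iv.2 := by
        simp [pkey, h0, eq_comm]
      constructor
      · rintro ((rfl | hd) | ⟨jv, hjv, hjp⟩)
        · exact Or.inr ⟨iv, Or.inl rfl, hp.mpr rfl⟩
        · exact Or.inl hd
        · exact Or.inr ⟨jv, Or.inr hjv, hjp⟩
      · rintro (hd | ⟨jv, (rfl | hjv), hjp⟩)
        · exact Or.inl (Or.inr hd)
        · exact Or.inl (Or.inl (hp.mp hjp))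
        · exact Or.inr ⟨jv, hjv, hjp⟩

lemma Gl_mem (vs : List (List (String × Int))) (k : Int × Int) (x : Int) :
    x ∈ Gl vs k ↔ ∃ j : Nat, j < vs.length ∧ x = (j : Int) ∧ pkey k (vs.getD j []) = true := by
  unfold Gl
  simp only [List.mem_map, List.mem_filter, PySem.List.mem_enumerate_iff]
  constructor
  · rintro ⟨⟨i, v⟩, ⟨⟨j, hj, hp⟩, hpk⟩, rfl⟩
    rw [Prod.mk.injEq] at hp
    refine ⟨j, hj, by simpa using hp.1, ?_⟩
    rw [List.getD_eq_getElem _ _ hj, ← hp.2]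
    exact hpk
  · rintro ⟨j, hj, rfl, hpk⟩
    refine ⟨((j : Int), vs[j]), ⟨⟨j, hj, by simp⟩, ?_⟩, rfl⟩
    rw [← List.getD_eq_getElem vs [] hj]
    exact hpk

lemma Gl_pairwise (vs : List (List (String × Int))) (k : Int × Int) :
    (Gl vs k).Pairwise (· < ·) := by
  unfold Gl
  rw [List.pairwise_map]
  exact (PySem.List.pairwise_lt_enumerate vs 0).filter _

lemma take_mem_strict (x : Int) :
    ∀ (l : List Int) (t : Nat), l.Pairwise (· < ·) →
      (x ∈ l.take t ↔ x ∈ l ∧ l.countP (fun y => decide (y < x)) < t) := by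
  intro l
  induction l with
  | nil => intro t _; simp
  | cons a rest ih =>
    intro t hpw
    have ha : ∀ y ∈ rest, a < y := (List.pairwise_cons.mp hpw).1
    have hpw' : rest.Pairwise (· < ·) := (List.pairwise_cons.mp hpw).2
    rcases t with _ | t
    · simp
    · rw [List.take_succ_cons]
      simp only [List.mem_cons, List.countP_cons]
      by_cases hxa : x = a
      · subst hxa
        have hz : rest.countP (fun y => decide (y < x)) = 0 := by
          apply List.countP_eq_zero.mpr
          intro y hy
          simp only [decide_eq_true_eq]
          exact not_lt.mpr (le_of_lt (ha y hy))
        simp [hz]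
      · have hxrest : x ∈ List.take t rest ↔ x ∈ rest ∧ rest.countP (fun y => decide (y < x)) < t :=
          ih t hpw'
        by_cases hxr : x ∈ rest
        · have hax : a < x := ha x hxr
          have hone : (if (decide (a < x)) = true then 1 else 0) = 1 := by simp [hax]
          rw [hxrest, hone]
          constructor
          · rintro (rfl | ⟨h1, h2⟩)
            · exact absurd rfl hxa
            · exact ⟨Or.inr h1, by omega⟩
          · rintro ⟨-, h2⟩
            exact Or.inr ⟨hxr, by omega⟩
        · have hnt : x ∉ List.take t rest := fun hmem => hxr (List.mem_of_mem_take hmem)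
          simp [hnt, hxa, hxr]

lemma enum_fst_ge (vs : List (List (String × Int))) (s : Int) (k : Int × Int) (y : Int)
    (hy : y ∈ ((PySem.List.enumerate vs s).filter (fun iv => pkey k iv.2)).map (·.1)) :
    s ≤ y := by
  simp only [List.mem_map, List.mem_filter, PySem.List.mem_enumerate_iff] at hy
  obtain ⟨⟨i, v⟩, ⟨⟨j, hj, hp⟩, _⟩, rfl⟩ := hy
  rw [Prod.mk.injEq] at hp
  simp only [hp.1]
  omega

lemma cntG (k : Int × Int) :
    ∀ (vs : List (List (String × Int))) (s : Int) (j : Nat), j ≤ vs.length →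
      (((PySem.List.enumerate vs s).filter (fun iv => pkey k iv.2)).map (·.1)).countP
          (fun y => decide (y < s + (j : Int)))
        = eCnt (vs.take j) k := by
  intro vs
  induction vs with
  | nil =>
    intro s j hj
    have hj0 : j = 0 := Nat.le_zero.mp hj
    subst hj0
    simp [PySem.List.enumerate_nil, eCnt]
  | cons v rest ih =>
    intro s j hj
    rcases j with _ | j
    · rw [List.countP_eq_zero.mpr]
      · simp [eCnt]
      · intro y hy
        have := enum_fst_ge (v :: rest) s k y hy
        simp only [decide_eq_true_eq]
        omega
    · rw [PySem.List.enumerate_cons, List.filter_cons]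
      have hcast : s + ((j + 1 : Nat) : Int) = (s + 1) + (j : Int) := by push_cast; ring
      have htail := ih (s + 1) j (by simpa using hj)
      by_cases hp : pkey k v = true
      · rw [if_pos hp, List.map_cons, List.countP_cons, hcast, htail]
        have hlt2 : s < s + 1 + (j : Int) := by omega
        simp [List.take_succ_cons, eCnt, hp, hlt2]
      · have hp' : pkey k v = false := by simpa using hp
        rw [if_neg (by simp [hp']), hcast, htail]
        simp [List.take_succ_cons, eCnt, hp']

def idxOfSel (m : Int) (vs : List (List (String × Int))) : List Int :=
  List.map (fun j : Nat => (j : Int)) ((List.range vs.length).filter (condT m [] vs))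

lemma idx_mem (m : Int) (vs : List (List (String × Int))) (x : Int) :
    x ∈ idxOfSel m vs ↔ ∃ j : Nat, j < vs.length ∧ condT m [] vs j = true ∧ x = (j : Int) := by
  unfold idxOfSel
  simp only [List.mem_map, List.mem_filter, List.mem_range]
  constructor
  · rintro ⟨j, ⟨hj, hc⟩, rfl⟩
    exact ⟨j, hj, hc, rfl⟩
  · rintro ⟨j, hj, hc, rfl⟩
    exact ⟨j, ⟨hj, hc⟩, rfl⟩

lemma idx_pairwise (m : Int) (vs : List (List (String × Int))) :
    (idxOfSel m vs).Pairwise (fun a b => a < b) := by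
  unfold idxOfSel
  rw [List.pairwise_map]
  exact (List.pairwise_lt_range.filter _).imp (fun h => by exact_mod_cast h)

lemma cntGl (k : Int × Int) (vs : List (List (String × Int))) (j : Nat) (hj : j ≤ vs.length) :
    (Gl vs k).countP (fun y => decide (y < (j : Int))) = eCnt (vs.take j) k := by
  have h := cntG k vs 0 j hj
  rw [zero_add] at h
  unfold Gl
  exact h

lemma amain (vs : List (List (String × Int))) (m : Int) (hm : 0 ≤ m) :
    select_vectors vs m = pickTail m [] vs := by
  unfold select_vectors
  simp only []
  set groups := (PySem.List.enumerate vs 0).foldl astep PySem.Dict.empty with hgroups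
  have hG : ∀ k, groups.getD k [] = Gl vs k := by
    intro k
    rw [hgroups, afold_getD]
    simp [Gl]
  have hkeys : ∀ k, (k ∈ groups.keys ↔ ∃ iv ∈ PySem.List.enumerate vs 0, pkey k iv.2 = true) := by
    intro k
    rw [hgroups, afold_keys]
    simp
  rw [PySem.List.foldl_append_eq_flatMap, List.nil_append]
  set S := (PySem.List.sorted2 groups.keys (fun k => k.1) (fun k => k.2)).flatMap
      (fun key => PySem.List.slice (groups.getD key []) none (some m)) with hS
  have hsorted : PySem.List.sorted (PySem.Set.ofList S) (fun i => i) false = idxOfSel m vs := by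
    apply PySem.List.sorted_eq_of_perm_of_pairwise_lt
    · apply (List.perm_ext_iff_of_nodup ?_ (PySem.Set.nodup_ofList S)).mpr
      · intro x
        rw [PySem.Set.mem_ofList, hS, List.mem_flatMap, idx_mem]
        constructor
        · rintro ⟨j, hj, hcond, rfl⟩
          rw [condT, Bool.and_eq_true] at hcond
          simp only [decide_eq_true_eq, List.nil_append, ne_eq] at hcond
          have hpk : pkey (keyOf (vs.getD j [])) (vs.getD j []) = true := by
            unfold pkey
            rw [decide_eq_true (show ordOf (vs.getD j []) ≠ 0 from hcond.1)]
            simp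
          refine ⟨keyOf (vs.getD j []), ?_, ?_⟩
          · rw [List.Perm.mem_iff (PySem.List.sorted2_perm _ _ _ _), hkeys]
            refine ⟨((j : Int), vs[j]), ?_, ?_⟩
            · rw [PySem.List.mem_enumerate_iff]
              exact ⟨j, hj, by simp⟩
            · rw [← List.getD_eq_getElem vs [] hj]
              exact hpk
          · rw [hG, PySem.List.slice_to _ hm]
            apply (take_mem_strict _ (Gl vs _) m.toNat (Gl_pairwise vs _)).mpr
            refine ⟨(Gl_mem vs _ _).mpr ⟨j, hj, rfl, hpk⟩, ?_⟩
            rw [cntGl _ vs j (le_of_lt hj)]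
            omega
        · rintro ⟨key, _, hxs⟩
          rw [hG, PySem.List.slice_to _ hm] at hxs
          have hxG : x ∈ Gl vs key := List.mem_of_mem_take hxs
          obtain ⟨j, hj, rfl, hpk⟩ := (Gl_mem vs key _).mp hxG
          have hcnt := (take_mem_strict _ (Gl vs key) m.toNat (Gl_pairwise vs key)).mp hxs
          rw [cntGl key vs j (le_of_lt hj)] at hcnt
          have hkparts := hpk
          simp only [pkey, Bool.and_eq_true, decide_eq_true_eq, ne_eq] at hkparts
          refine ⟨j, hj, ?_, rfl⟩
          rw [condT, Bool.and_eq_true]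
          refine ⟨by simp only [decide_eq_true_eq, ne_eq]; exact hkparts.1, ?_⟩
          simp only [decide_eq_true_eq, List.nil_append, hkparts.2]
          omega
      · exact (idx_pairwise m vs).imp (fun h => ne_of_lt h)
    · exact idx_pairwise m vs
  rw [hsorted]
  unfold idxOfSel pickTail
  rw [List.map_map]
  apply List.map_congr_left
  intro j _
  simp [Function.comp, PySem.List.pyGetD_natCast]

-- ===== VERDICT (by name: the statement is the Claim_ definition above) =====
theorem select_vectors_spec : Claim_equal_select_vectors := by
  intro vectors m _ hPre
  unfold Spec_select_vectors
  rw [amain vectors m hPre.1]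
  rw [show select_vectors_alt vectors m
      = (vectors.foldl (bstep m) (PySem.Dict.empty, [])).2 from rfl]
  rw [bfold m vectors [] PySem.Dict.empty []
      (by intro k; simp [eCnt, min_eq_right hPre.1])]
  simp
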